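-- pv_equiv track=rewrite | github.com/GiaAlenay/recordando_python | manejoStrings.py | mostrarPares
-- ===== SOURCE A (Python) =====
-- def mostrarPares(cadena):
--     diccionario_Cadena = {}
--     lista_pares = []
--     for str in cadena:
--         if str in diccionario_Cadena:
--             diccionario_Cadena[str] += 1
--         else:
--             diccionario_Cadena[str] = 1
--     for key in diccionario_Cadena:
--         if diccionario_Cadena[key] % 2 == 0:
--             lista_pares.append(key)
--
--     return ''.join(lista_pares)
-- ===== SOURCE B (Python) =====
-- def mostrarPares(cadena):
--     odd = set()
--     for c in cadena:
--         if c in odd: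
--             odd.remove(c)
--         else:
--             odd.add(c)
--     seen = set()
--     out = []
--     for c in cadena:
--         if c not in seen:
--             seen.add(c)
--             if c not in odd:
--                 out.append(c)
--     return ''.join(out)
-- ===== Notes on version B (the rewrite author's own statement) =====
-- stated objective: alternative
-- what changed: B never stores counts: it maintains a parity set toggled per character (add/remove) plus a first-occurrence pass with a seen set, instead of A's frequency dictionary scanned for even values.
import Mathlib
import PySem

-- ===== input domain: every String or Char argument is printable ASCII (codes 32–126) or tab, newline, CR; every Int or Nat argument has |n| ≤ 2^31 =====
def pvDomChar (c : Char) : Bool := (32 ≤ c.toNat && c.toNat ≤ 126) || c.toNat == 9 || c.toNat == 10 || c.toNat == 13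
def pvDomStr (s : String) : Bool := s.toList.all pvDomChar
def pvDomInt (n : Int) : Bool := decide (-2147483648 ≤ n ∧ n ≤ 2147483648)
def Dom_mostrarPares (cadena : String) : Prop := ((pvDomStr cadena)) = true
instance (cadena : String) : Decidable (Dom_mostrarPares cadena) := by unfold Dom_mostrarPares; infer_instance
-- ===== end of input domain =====

-- B builds a parity set by toggling membership, then filters first occurrences, instead of A's count dictionary; same cost, different data maintained (objective: alternative).

-- ===== PORT A =====
def mostrarPares (cadena : String) : String :=
  let d : PySem.Dict Char Int := cadena.toList.foldl
    (fun d s => if d.contains s then d.insert s (d.getD s 0 + 1) else d.insert s 1)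
    PySem.Dict.empty
  let lista_pares : List Char := d.keys.foldl
    (fun acc key => if PySem.Int.mod (d.getD key 0) 2 == 0 then acc ++ [key] else acc) []
  String.ofList lista_pares

-- ===== PORT B =====
def mostrarPares_alt (cadena : String) : String :=
  let odd : PySem.Set Char := cadena.toList.foldl
    (fun s c => if PySem.Set.contains s c then PySem.Set.discard s c else PySem.Set.add s c)
    PySem.Set.empty
  let st : PySem.Set Char × List Char := cadena.toList.foldl
    (fun st c =>
      if PySem.Set.contains st.1 c then st
      else (PySem.Set.add st.1 c,
            if PySem.Set.contains odd c then st.2 else st.2 ++ [c]))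
    (PySem.Set.empty, [])
  String.ofList st.2

-- ===== PRECONDITION & SPEC =====
def Spec_mostrarPares (cadena : String) (out : String) : Prop := out = mostrarPares_alt cadena
instance (cadena : String) (out : String) : Decidable (Spec_mostrarPares cadena out) := by unfold Spec_mostrarPares; infer_instance

-- ===== CLAIM (what is proved, stated in full; the proofs are below) =====
def Claim_equal_mostrarPares : Prop := ∀ (cadena : String), Dom_mostrarPares cadena → Spec_mostrarPares cadena (mostrarPares cadena)

-- ===== LEMMAS AND PROOFS =====

-- A's dictionary loop: keys are the distinct characters in first-appearance order
theorem keysA (cs : List Char) :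
    (cs.foldl (fun d s => if d.contains s then d.insert s (d.getD s 0 + 1) else d.insert s 1)
      (PySem.Dict.empty : PySem.Dict Char Int)).keys = PySem.Set.ofList cs := by
  induction cs using List.reverseRecOn with
  | nil => simp [PySem.Dict.keys_empty, PySem.Set.ofList_nil]
  | append_singleton l c ih =>
    rw [List.foldl_append, PySem.Set.ofList_append_singleton]
    simp only [List.foldl]
    by_cases h : (l.foldl (fun d s => if d.contains s then d.insert s (d.getD s 0 + 1) else d.insert s 1)
      (PySem.Dict.empty : PySem.Dict Char Int)).contains c = true
    · have hm : c ∈ PySem.Set.ofList l := by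
        rw [← ih]; exact (PySem.Dict.contains_iff_mem_keys _ _).mp h
      rw [if_pos h, PySem.Dict.keys_insert_of_contains _ _ h, ih, PySem.Set.add_of_mem hm]
    · have hb : (l.foldl (fun d s => if d.contains s then d.insert s (d.getD s 0 + 1) else d.insert s 1)
        (PySem.Dict.empty : PySem.Dict Char Int)).contains c = false := by
        simpa using h
      have hm : c ∉ PySem.Set.ofList l := by
        rw [← ih]; intro hc; exact h ((PySem.Dict.contains_iff_mem_keys _ _).mpr hc)
      rw [if_neg h, PySem.Dict.keys_insert_of_not_contains _ _ hb, ih, PySem.Set.add_of_not_mem hm]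

-- A's dictionary loop: the stored value is the character count
theorem countA (cs : List Char) (x : Char) :
    (cs.foldl (fun d s => if d.contains s then d.insert s (d.getD s 0 + 1) else d.insert s 1)
      (PySem.Dict.empty : PySem.Dict Char Int)).getD x 0 = (cs.count x : Int) := by
  induction cs using List.reverseRecOn with
  | nil => simp [PySem.Dict.getD_empty]
  | append_singleton l c ih =>
    rw [List.foldl_append]
    simp only [List.foldl]
    set d := l.foldl (fun d s => if d.contains s then d.insert s (d.getD s 0 + 1) else d.insert s 1)
      (PySem.Dict.empty : PySem.Dict Char Int) with hd
    have hcount : ((l ++ [c]).count x : Int) = (l.count x : Int) + (if x = c then 1 else 0) := by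
      by_cases hxc : x = c
      · subst hxc; simp [List.count_append]
      · simp [List.count_append, hxc, Ne.symm hxc]
    by_cases h : d.contains c = true
    · rw [if_pos h, PySem.Dict.getD_insert, hcount]
      by_cases hxc : x = c
      · subst hxc; simp [ih]
      · simp [hxc, ih]
    · have hb : d.contains c = false := by simpa using h
      have hcl : c ∉ l := by
        intro hc
        have : c ∈ PySem.Set.ofList l := (PySem.Set.mem_ofList _ _).mpr hc
        rw [← keysA l] at this
        exact h ((PySem.Dict.contains_iff_mem_keys _ _).mpr this)
      rw [if_neg (by simp [hb]), PySem.Dict.getD_insert, hcount]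
      by_cases hxc : x = c
      · subst hxc
        have : l.count x = 0 := List.count_eq_zero.mpr hcl
        simp [this]
      · simp [hxc, ih]

-- B's toggle loop: membership in the set is odd count
theorem memOdd (cs : List Char) (x : Char) :
    (x ∈ cs.foldl (fun s c => if PySem.Set.contains s c then PySem.Set.discard s c else PySem.Set.add s c)
      (PySem.Set.empty : PySem.Set Char)) ↔ cs.count x % 2 = 1 := by
  induction cs using List.reverseRecOn with
  | nil => simp [PySem.Set.empty]
  | append_singleton l c ih =>
    rw [List.foldl_append]
    simp only [List.foldl]
    set s := l.foldl (fun s c => if PySem.Set.contains s c then PySem.Set.discard s c else PySem.Set.add s c)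
      (PySem.Set.empty : PySem.Set Char) with hs
    have hcount : (l ++ [c]).count x = l.count x + (if x = c then 1 else 0) := by
      by_cases hxc : x = c
      · subst hxc; simp [List.count_append]
      · simp [List.count_append, hxc, Ne.symm hxc]
    by_cases h : PySem.Set.contains s c = true
    · have hmc : c ∈ s := (PySem.Set.contains_iff _ _).mp h
      rw [if_pos h, hcount]
      by_cases hxc : x = c
      · subst hxc
        have hodd : l.count x % 2 = 1 := ih.mp hmc
        simp [PySem.Set.mem_discard]
        omega
      · simp [PySem.Set.mem_discard, hxc, ih]
    · have hmc : c ∉ s := fun hc => h ((PySem.Set.contains_iff _ _).mpr hc)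
      rw [if_neg h, hcount]
      by_cases hxc : x = c
      · subst hxc
        have heven : ¬ l.count x % 2 = 1 := fun hh => hmc (ih.mpr hh)
        simp [PySem.Set.mem_add]
        omega
      · simp [PySem.Set.mem_add, hxc, ih]

-- B's second loop: first component is the ordered distinct set, second the filtered output
theorem passB (odd : PySem.Set Char) (cs : List Char) :
    cs.foldl (fun st c =>
        if PySem.Set.contains st.1 c then st
        else (PySem.Set.add st.1 c,
              if PySem.Set.contains odd c then st.2 else st.2 ++ [c]))
      ((PySem.Set.empty : PySem.Set Char), ([] : List Char))
    = (PySem.Set.ofList cs,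
       (PySem.Set.ofList cs).filter (fun c => !(PySem.Set.contains odd c))) := by
  induction cs using List.reverseRecOn with
  | nil => simp [PySem.Set.ofList_nil, PySem.Set.empty]
  | append_singleton l c ih =>
    rw [List.foldl_append]
    simp only [List.foldl, ih]
    rw [PySem.Set.ofList_append_singleton]
    by_cases h : PySem.Set.contains (PySem.Set.ofList l) c = true
    · have hm : c ∈ PySem.Set.ofList l := (PySem.Set.contains_iff _ _).mp h
      rw [if_pos h, PySem.Set.add_of_mem hm]
    · have hm : c ∉ PySem.Set.ofList l := fun hc => h ((PySem.Set.contains_iff _ _).mpr hc)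
      rw [if_neg h, PySem.Set.add_of_not_mem hm, List.filter_append]
      by_cases ho : c ∈ odd
      · simp [ho]
      · simp [ho]

-- ===== VERDICT (by name: the statement is the Claim_ definition above) =====
theorem mostrarPares_spec : Claim_equal_mostrarPares := by
  unfold Claim_equal_mostrarPares Spec_mostrarPares
  intro cadena _
  unfold mostrarPares mostrarPares_alt
  simp only [passB]
  rw [PySem.List.foldl_append_if_eq_filter]
  simp only [List.nil_append, keysA]
  congr 1
  apply List.filter_congr
  intro k _
  rw [countA]
  have hmod : PySem.Int.mod ((cadena.toList.count k : Nat) : Int) 2 = (((cadena.toList.count k) % 2 : Nat) : Int) := by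
    exact_mod_cast PySem.Int.mod_natCast (cadena.toList.count k) 2
  rw [hmod]
  have hmem := memOdd cadena.toList k
  by_cases hm : k ∈ cadena.toList.foldl
      (fun s c => if PySem.Set.contains s c then PySem.Set.discard s c else PySem.Set.add s c)
      (PySem.Set.empty : PySem.Set Char)
  · have h1 : cadena.toList.count k % 2 = 1 := hmem.mp hm
    rw [h1, (PySem.Set.contains_iff _ _).mpr hm]
    decide
  · have hcf : PySem.Set.contains
        (cadena.toList.foldl (fun s c => if PySem.Set.contains s c then PySem.Set.discard s c else PySem.Set.add s c)
          (PySem.Set.empty : PySem.Set Char)) k = false := by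
      rw [Bool.eq_false_iff]
      intro hct
      exact hm ((PySem.Set.contains_iff _ _).mp hct)
    have h0 : cadena.toList.count k % 2 = 0 := by
      rcases Nat.mod_two_eq_zero_or_one (cadena.toList.count k) with h0 | h1
      · exact h0
      · exact absurd (hmem.mpr h1) hm
    rw [h0, hcf]
    decide
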